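-- pv_equiv track=rewrite | github.com/KaimingTao/computing-mass | Data analysis/Table data/table/group_table.py | _group_records_by_keys
-- ===== SOURCE A (Python) =====
-- from collections import defaultdict
-- from collections import defaultdict
-- from collections import defaultdict
--
-- def _group_records_by_keys(records, group_key_list):
--
--     group_result = defaultdict(list)
--     for r in records:
--         primary_key = {}
--         for key in group_key_list:
--             primary_key[key] = r[key]
--
--         primary_key = tuple(sorted(primary_key.items()))
--
--         group_result[tuple(primary_key)].append(r)
--
--     return group_result
-- ===== SOURCE B (Python) =====
-- from collections import defaultdict
--
--
-- def _group_records_by_keys(records, group_key_list):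
--     # Two-pass gather: precompute every record's group key, dedupe the keys in
--     # first-occurrence order, then collect each group with one filter per key.
--     keyed = [(tuple(sorted({k: r[k] for k in group_key_list}.items())), r)
--              for r in records]
--     group_result = defaultdict(list)
--     for key in dict.fromkeys(k for k, _ in keyed):
--         group_result[key] = [r for kk, r in keyed if kk == key]
--     return group_result
-- ===== Notes on version B (the rewrite author's own statement) =====
-- stated objective: alternative
-- what changed: A builds the grouping incrementally, appending each record to a defaultdict bucket as it scans; B precomputes every record's group key in one pass, dedupes the keys in first-occurrence order, and then gathers each group with a filter per distinct key.
import Mathlib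
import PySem

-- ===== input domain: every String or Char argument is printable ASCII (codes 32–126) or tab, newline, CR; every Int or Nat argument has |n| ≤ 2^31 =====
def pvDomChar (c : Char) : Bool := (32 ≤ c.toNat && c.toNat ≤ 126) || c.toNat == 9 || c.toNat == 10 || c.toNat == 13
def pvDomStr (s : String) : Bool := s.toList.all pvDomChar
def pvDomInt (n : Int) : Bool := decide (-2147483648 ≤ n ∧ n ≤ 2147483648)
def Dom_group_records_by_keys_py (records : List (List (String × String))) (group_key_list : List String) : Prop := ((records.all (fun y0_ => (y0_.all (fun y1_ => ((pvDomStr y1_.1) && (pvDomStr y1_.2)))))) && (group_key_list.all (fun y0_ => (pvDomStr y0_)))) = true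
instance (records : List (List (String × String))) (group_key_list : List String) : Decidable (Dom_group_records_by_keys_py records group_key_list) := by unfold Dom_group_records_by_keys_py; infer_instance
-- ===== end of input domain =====

-- B replaces A's incremental defaultdict-append loop by a two-pass gather (precompute keys, dedupe, one filter per distinct key); objective: alternative decomposition, same results.

-- ===== PORT A =====
-- shared key computation: dict built over group_key_list (duplicates collapse), then sorted items.
-- r[key] raises KeyError when the key is absent — excluded by Pre_; the "" default is never read there.
-- the dict's items have pairwise-distinct first components, so Python's tuple sort equals the stable sort by first component.
def pyGroupKey (group_key_list : List String) (r : List (String × String)) : List (String × String) :=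
  let primary_key := group_key_list.foldl
    (fun d key => d.insert key ((PySem.Dict.mk r).getD key "")) PySem.Dict.empty
  PySem.List.sorted primary_key.items (fun p => p.1)

def group_records_by_keys_py (records : List (List (String × String))) (group_key_list : List String) : List (List (String × String) × List (List (String × String))) :=
  (records.foldl
    (fun d r => d.modify (pyGroupKey group_key_list r) [] (fun l => l ++ [r]))
    PySem.Dict.empty).items

-- ===== PORT B =====
def group_records_by_keys_py_alt (records : List (List (String × String))) (group_key_list : List String) : List (List (String × String) × List (List (String × String))) :=
  let keyed := records.map (fun r => (pyGroupKey group_key_list r, r))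
  (PySem.List.dedup (keyed.map (fun p => p.1))).map
    (fun k => (k, (keyed.filter (fun p => p.1 == k)).map (fun p => p.2)))

-- ===== PRECONDITION & SPEC =====
-- Pre_ excludes exactly the inputs where Python A raises KeyError: some record missing a key of group_key_list.
def Pre_group_records_by_keys_py (records : List (List (String × String))) (group_key_list : List String) : Prop :=
  (records.all (fun r => group_key_list.all (fun k => r.any (fun p => p.1 == k)))) = true
instance (records : List (List (String × String))) (group_key_list : List String) : Decidable (Pre_group_records_by_keys_py records group_key_list) := by unfold Pre_group_records_by_keys_py; infer_instance
def pvWitness_group_records_by_keys_py : (List (List (String × String))) × List String :=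
  ([[("a", "x"), ("b", "y")], [("a", "x"), ("b", "z")]], ["a"])

def Spec_group_records_by_keys_py (records : List (List (String × String))) (group_key_list : List String) (out : List (List (String × String) × List (List (String × String)))) : Prop := out = group_records_by_keys_py_alt records group_key_list
instance (records : List (List (String × String))) (group_key_list : List String) (out : List (List (String × String) × List (List (String × String)))) : Decidable (Spec_group_records_by_keys_py records group_key_list out) := by unfold Spec_group_records_by_keys_py; infer_instance

-- ===== CLAIM (what is proved, stated in full; the proofs are below) =====
def Claim_equal_group_records_by_keys_py : Prop := ∀ (records : List (List (String × String))) (group_key_list : List String), Dom_group_records_by_keys_py records group_key_list → Pre_group_records_by_keys_py records group_key_list → Spec_group_records_by_keys_py records group_key_list (group_records_by_keys_py records group_key_list)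

-- ===== LEMMAS AND PROOFS =====

-- ===== VERDICT (by name: the statement is the Claim_ definition above) =====
lemma ports_agree (records : List (List (String × String))) (group_key_list : List String) :
    group_records_by_keys_py records group_key_list = group_records_by_keys_py_alt records group_key_list := by
  unfold group_records_by_keys_py group_records_by_keys_py_alt
  have hnd := PySem.Dict.nodup_keys_foldl_modify_key records (pyGroupKey group_key_list) []
      (fun _ r => (fun l => l ++ [r])) PySem.Dict.empty (by simp [PySem.Dict.empty, PySem.Dict.keys])
  rw [PySem.Dict.items_eq_map_keys _ hnd []]
  rw [PySem.Dict.keys_foldl_modify_key records (pyGroupKey group_key_list) []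
      (fun _ r => (fun l => l ++ [r])) PySem.Dict.empty]
  simp only [List.map_map, Function.comp_def]
  have hup : PySem.Set.update
      (PySem.Dict.empty (κ := List (String × String)) (ν := List (List (String × String)))).keys
      (records.map (fun r => pyGroupKey group_key_list r))
      = PySem.List.dedup (records.map (fun r => pyGroupKey group_key_list r)) := rfl
  rw [hup]
  apply List.map_congr_left
  intro k hk
  congr 1
  rw [show (records.foldl (fun d r => d.modify (pyGroupKey group_key_list r) [] (fun l => l ++ [r])) PySem.Dict.empty)
      = ((records.map (fun r => (pyGroupKey group_key_list r, r))).foldl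
          (fun d p => d.modify p.1 [] (fun l => l ++ [p.2])) PySem.Dict.empty)
    from (List.foldl_map (f := fun r => (pyGroupKey group_key_list r, r))
      (g := fun d p => d.modify p.1 [] (fun l => l ++ [p.2])) (l := records) (init := PySem.Dict.empty)).symm]
  rw [PySem.Dict.getD_foldl_modify_append]
  rfl

theorem group_records_by_keys_py_spec : Claim_equal_group_records_by_keys_py := by
  intro records gkl _ _
  exact ports_agree records gkl
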